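-- pv_equiv track=rewrite | github.com/ValentinCabrera/codificador | logic/codes.py | b8zs
-- ===== SOURCE A (Python) =====
-- def invertir(sim):
--     if sim == '+':
--         return '-'
--
--     elif sim == '-':
--         return '+'
--
-- def b8zs(sec, last_sign='+'):
--     """
--     Codifica una secuencia electrica a binaria en B8ZS
--
--     Parametros: Secuencia binaria
--
--     Retornos: Pulsos electrica
--     """
--
--     NAME = "B8ZS"
--
--     code = []
--
--     i = 0
--     while i < len(sec):
--         if sec[i] == '1':
--             last_sign = invertir(last_sign)
--             code.append(last_sign)
--
--         elif sec[i] == '0':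
--             if i + 7 < len(sec):
--                 for j in range(8):
--                     if sec[i + j] != '0':
--                         code.append('0')
--                         break
--
--                 else:
--                         code.extend(['0'] * 3 + [last_sign, invertir(last_sign), '0', invertir(last_sign), last_sign])
--                         i += 7
--
--             else:
--                 code.append('0')
--
--         i += 1
--
--     return code, NAME
-- ===== SOURCE B (Python) =====
-- def invertir(sim):
--     if sim == '+':
--         return '-'
--
--     elif sim == '-':
--         return '+'
--
--
-- def b8zs(sec, last_sign='+'):
--     """Single-pass B8ZS encoder keeping a counter of pending consecutive '0's."""
--     NAME = "B8ZS"
--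
--     code = []
--     zeros = 0
--     for ch in sec:
--         if ch == '1':
--             code.extend(['0'] * zeros)
--             zeros = 0
--             last_sign = invertir(last_sign)
--             code.append(last_sign)
--         elif ch == '0':
--             zeros += 1
--             if zeros == 8:
--                 code.extend(['0', '0', '0', last_sign, invertir(last_sign), '0', invertir(last_sign), last_sign])
--                 zeros = 0
--         else:
--             code.extend(['0'] * zeros)
--             zeros = 0
--     code.extend(['0'] * zeros)
--     return code, NAME
-- ===== Notes on version B (the rewrite author's own statement) =====
-- stated objective: alternative
-- what changed: Replaced A's indexed while-loop with an 8-character lookahead window re-scanned at every '0' by a single pass over the characters that keeps a counter of pending consecutive '0's, substituting when the counter reaches 8 and flushing it on any non-'0'.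
-- outside the precondition, e.g. on b8zs('1', 'x'): A returns ([None], 'B8ZS'), B returns ([None], 'B8ZS')
import Mathlib
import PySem

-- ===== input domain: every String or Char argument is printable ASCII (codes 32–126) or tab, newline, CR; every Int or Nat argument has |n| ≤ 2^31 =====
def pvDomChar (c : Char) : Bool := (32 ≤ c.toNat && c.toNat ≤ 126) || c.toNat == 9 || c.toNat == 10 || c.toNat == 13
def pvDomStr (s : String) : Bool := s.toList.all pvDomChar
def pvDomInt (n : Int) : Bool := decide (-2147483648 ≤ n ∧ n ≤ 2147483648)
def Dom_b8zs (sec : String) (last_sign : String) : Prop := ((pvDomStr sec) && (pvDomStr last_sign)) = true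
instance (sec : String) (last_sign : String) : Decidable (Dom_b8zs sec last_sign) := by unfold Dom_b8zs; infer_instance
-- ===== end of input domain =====

-- B replaces A's 8-character lookahead window (re-scanned at every '0') by a single pass over
-- the characters keeping a counter of pending consecutive '0's; alternative decomposition.

-- ===== PORT A =====

-- Python's invertir returns None for sim ∉ {'+','-'}; that path is reachable only outside
-- Pre_b8zs, where nothing is claimed, so the port returns "" there.
def invertir (sim : String) : String :=
  if sim = "+" then "-" else if sim = "-" then "+" else ""

-- inner "for j in range(8): if sec[i+j] != '0': … break / else: …"; true = ran to completion
def b8zsWin (s : List Char) (i : Nat) (j : Nat) : Bool :=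
  if j < 8 then
    if s.getD (i + j) ' ' ≠ '0' then false
    else b8zsWin s i (j + 1)
  else true
termination_by 8 - j

-- the "while i < len(sec)" loop of A (i += 7 then i += 1 gives the jump by 8)
def b8zsLoop (s : List Char) (i : Nat) (last : String) (code : List String) : List String :=
  if _h : i < s.length then
    if s.getD i ' ' = '1' then
      b8zsLoop s (i + 1) (invertir last) (code ++ [invertir last])
    else if s.getD i ' ' = '0' then
      if i + 7 < s.length then
        if b8zsWin s i 0 then
          b8zsLoop s (i + 8) last
            (code ++ ["0", "0", "0", last, invertir last, "0", invertir last, last])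
        else
          b8zsLoop s (i + 1) last (code ++ ["0"])
      else
        b8zsLoop s (i + 1) last (code ++ ["0"])
    else
      b8zsLoop s (i + 1) last code
  else code
termination_by s.length - i

def b8zs (sec : String) (last_sign : String) : List String × String :=
  (b8zsLoop sec.toList 0 last_sign [], "B8ZS")

-- ===== PORT B =====

-- single pass over the characters with a counter of pending consecutive '0's
def b8zsAltLoop : List Char → Nat → String → List String → List String
  | [], zeros, _, code => code ++ List.replicate zeros "0"
  | c :: rest, zeros, last, code =>
    if c = '1' then
      b8zsAltLoop rest 0 (invertir last) ((code ++ List.replicate zeros "0") ++ [invertir last])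
    else if c = '0' then
      if zeros + 1 = 8 then
        b8zsAltLoop rest 0 last
          (code ++ ["0", "0", "0", last, invertir last, "0", invertir last, last])
      else
        b8zsAltLoop rest (zeros + 1) last code
    else
      b8zsAltLoop rest 0 last (code ++ List.replicate zeros "0")

def b8zs_alt (sec : String) (last_sign : String) : List String × String :=
  (b8zsAltLoop sec.toList 0 last_sign [], "B8ZS")

-- ===== PRECONDITION & SPEC =====
-- Pre_ excludes inputs whose result contains Python's None (not a str, so not a value of
-- List String): a last_sign outside {'+','-'} combined with a sec that makes A emit a sign
-- (a '1', or a fully contained run of eight '0's).  A and B return the SAME value there.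
def Pre_b8zs (sec : String) (last_sign : String) : Prop :=
  last_sign = "+" ∨ last_sign = "-" ∨
    ('1' ∉ sec.toList ∧ ¬ (List.replicate 8 '0' <:+: sec.toList))
instance (sec : String) (last_sign : String) : Decidable (Pre_b8zs sec last_sign) := by
  unfold Pre_b8zs; infer_instance

def pvWitness_b8zs : String × String := ("1000000001", "+")

def Spec_b8zs (sec : String) (last_sign : String) (out : List String × String) : Prop :=
  out = b8zs_alt sec last_sign
instance (sec : String) (last_sign : String) (out : List String × String) :
    Decidable (Spec_b8zs sec last_sign out) := by unfold Spec_b8zs; infer_instance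

-- ===== CLAIM (what is proved, stated in full; the proofs are below) =====
def Claim_equal_b8zs : Prop := ∀ (sec : String) (last_sign : String),
  Dom_b8zs sec last_sign → Pre_b8zs sec last_sign → Spec_b8zs sec last_sign (b8zs sec last_sign)

-- ===== LEMMAS AND PROOFS =====

lemma getD_drop (s : List Char) (i m : Nat) :
    (s.drop i).getD m ' ' = s.getD (i + m) ' ' := by
  simp [List.getD, List.getElem?_drop]

-- flushing the pending zeros early does not change the result when the next char is not '0'
lemma altLoop_flush (l : List Char) (z : Nat) (last : String) (code : List String)
    (h : l.head? ≠ some '0') :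
    b8zsAltLoop l z last code = b8zsAltLoop l 0 last (code ++ List.replicate z "0") := by
  cases l with
  | nil => simp [b8zsAltLoop]
  | cons c rest =>
    have hc : c ≠ '0' := by simpa using h
    by_cases h1 : c = '1' <;> simp [b8zsAltLoop, h1, hc, List.append_assoc]

def subBlock (last : String) : List String :=
  ["0", "0", "0", last, invertir last, "0", invertir last, last]

def repSub : Nat → String → List String
  | 0, _ => []
  | k + 1, last => subBlock last ++ repSub k last

-- B consuming a block of n '0's starting from counter state z
lemma altLoop_zeros (last : String) :
    ∀ (n : Nat) (l : List Char) (z : Nat) (code : List String), z < 8 →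
      b8zsAltLoop (List.replicate n '0' ++ l) z last code
        = b8zsAltLoop l ((z + n) % 8) last (code ++ repSub ((z + n) / 8) last) := by
  intro n
  induction n with
  | zero =>
    intro l z code hz
    simp [Nat.mod_eq_of_lt hz, Nat.div_eq_of_lt hz, repSub]
  | succ n ih =>
    intro l z code hz
    rw [List.replicate_succ, List.cons_append]
    by_cases h8 : z + 1 = 8
    · have hstep : b8zsAltLoop ('0' :: (List.replicate n '0' ++ l)) z last code
          = b8zsAltLoop (List.replicate n '0' ++ l) 0 last (code ++ subBlock last) := by
        simp [b8zsAltLoop, h8, subBlock]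
      rw [hstep, ih l 0 (code ++ subBlock last) (by omega)]
      have e1 : (z + (n + 1)) % 8 = (0 + n) % 8 := by omega
      have e2 : (z + (n + 1)) / 8 = (0 + n) / 8 + 1 := by omega
      rw [e1, e2]
      have e3 : repSub ((0 + n) / 8 + 1) last = subBlock last ++ repSub ((0 + n) / 8) last := rfl
      rw [e3, ← List.append_assoc]
    · have hstep : b8zsAltLoop ('0' :: (List.replicate n '0' ++ l)) z last code
          = b8zsAltLoop (List.replicate n '0' ++ l) (z + 1) last code := by
        simp [b8zsAltLoop, h8]
      rw [hstep, ih l (z + 1) code (by omega)]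
      have e1 : z + 1 + n = z + (n + 1) := by omega
      rw [e1]

-- the window check succeeds exactly when positions i+j … i+7 are all '0'
lemma win_iff (s : List Char) (i : Nat) :
    ∀ (k j : Nat), 8 - j ≤ k →
      (b8zsWin s i j = true ↔ ∀ m, j ≤ m → m < 8 → s.getD (i + m) ' ' = '0') := by
  intro k
  induction k with
  | zero =>
    intro j hj
    have h8 : ¬ j < 8 := by omega
    unfold b8zsWin
    simp only [h8, if_false]
    constructor
    · intro _ m hm1 hm2; omega
    · intro _; trivial
  | succ k ih =>
    intro j hj
    by_cases hjl : j < 8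
    · unfold b8zsWin
      simp only [hjl, if_true]
      by_cases hc : s.getD (i + j) ' ' = '0'
      · simp only [hc, ne_eq, not_true_eq_false, if_false]
        rw [ih (j + 1) (by omega)]
        constructor
        · intro h m hm1 hm2
          rcases Nat.eq_or_lt_of_le hm1 with rfl | h'
          · exact hc
          · exact h m h' hm2
        · intro h m hm1 hm2; exact h m (by omega) hm2
      · simp only [hc, ne_eq, not_false_eq_true, if_true]
        constructor
        · intro h; cases h
        · intro h; exact absurd (h j le_rfl hjl) hc
    · exact ih j (by omega)

-- A appends r single '0's while walking a zero run of length r < 8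
lemma aLoop_run (s : List Char) (last : String) :
    ∀ (r i : Nat) (code : List String), r < 8 →
      (∀ m, m < r → s.getD (i + m) ' ' = '0') →
      (i + r = s.length ∨ s.getD (i + r) ' ' ≠ '0') →
      i + r ≤ s.length →
      b8zsLoop s i last code = b8zsLoop s (i + r) last (code ++ List.replicate r "0") := by
  intro r
  induction r with
  | zero => intro i code _ _ _ _; simp
  | succ r ih =>
    intro i code hr hz hend hle
    have hi : i < s.length := by omega
    have h0 : s.getD i ' ' = '0' := by simpa using hz 0 (by omega)
    have h1 : s.getD i ' ' ≠ '1' := by rw [h0]; decide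
    have hwin : i + 7 < s.length → b8zsWin s i 0 = false := by
      intro h7
      cases hb : b8zsWin s i 0 with
      | false => rfl
      | true =>
        have hall := (win_iff s i 8 0 (by omega)).mp hb
        rcases hend with he | he
        · omega
        · exact absurd (hall (r + 1) (by omega) (by omega)) he
    have hstep : b8zsLoop s i last code = b8zsLoop s (i + 1) last (code ++ ["0"]) := by
      rw [b8zsLoop.eq_def]
      rw [dif_pos hi, if_neg h1, if_pos h0]
      by_cases h7 : i + 7 < s.length
      · rw [if_pos h7, hwin h7]; simp
      · rw [if_neg h7]
    rw [hstep, ih (i + 1) (code ++ ["0"]) (by omega)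
        (fun m hm => by
          have := hz (m + 1) (by omega)
          rwa [show i + 1 + m = i + (m + 1) by omega])
        (by rcases hend with he | he
            · left; omega
            · right; rwa [show i + 1 + r = i + (r + 1) by omega])
        (by omega)]
    have e : i + 1 + r = i + (r + 1) := by omega
    rw [e, List.append_assoc]
    rfl

-- the maximal zero run starting at position i (head '0')
lemma drop_run (s : List Char) (i : Nat) (hi : i < s.length) (h0 : s.getD i ' ' = '0') :
    ∃ r, 1 ≤ r ∧ i + r ≤ s.length ∧
      (∀ m, m < r → s.getD (i + m) ' ' = '0') ∧
      (i + r = s.length ∨ s.getD (i + r) ' ' ≠ '0') ∧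
      s.drop i = List.replicate r '0' ++ s.drop (i + r) := by
  set l := s.drop i with hl
  set t := l.takeWhile (· = '0') with ht
  have hlen_l : l.length = s.length - i := by simp [hl]
  have htle : t.length ≤ l.length := (List.takeWhile_prefix _).length_le
  have hrep : t = List.replicate t.length '0' := by
    apply List.eq_replicate_of_mem
    intro b hb
    simpa using List.mem_takeWhile_imp hb
  have hsplit : l = t ++ l.dropWhile (· = '0') := (List.takeWhile_append_dropWhile).symm
  have hdroplen : l.dropWhile (· = '0') = l.drop t.length := by
    conv_lhs => rw [show l.dropWhile (· = '0') = (t ++ l.dropWhile (· = '0')).drop t.length from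
      (List.drop_left' rfl).symm, ← hsplit]
  have hdrop_ir : s.drop (i + t.length) = l.dropWhile (· = '0') := by
    rw [hdroplen, hl, List.drop_drop]
  refine ⟨t.length, ?_, by omega, ?_, ?_, ?_⟩
  · -- head of l is '0', so takeWhile is nonempty
    have hne : l ≠ [] := by
      intro h
      have := congrArg List.length h
      simp [hlen_l] at this
      omega
    obtain ⟨c, rest, hcr⟩ := List.exists_cons_of_ne_nil hne
    have hc0 : c = '0' := by
      have h2 := getD_drop s i 0
      rw [← hl, hcr] at h2
      simp only [List.getD_cons_zero, Nat.add_zero] at h2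
      rw [h2]; exact h0
    rw [ht, hcr, List.takeWhile_cons]
    simp [hc0]
  · intro m hm
    have hml : m < l.length := by omega
    have hmt : m < t.length := hm
    have hpref : t <+: l := by rw [ht]; exact List.takeWhile_prefix _
    have h2 : t[m]'hmt = l[m]'hml := List.IsPrefix.getElem hpref hmt
    have h3 : t[m]'hmt = '0' := by
      rw [List.getElem_of_eq hrep hmt]
      exact List.getElem_replicate _
    rw [← getD_drop, ← hl, List.getD_eq_getElem l ' ' hml, ← h2, h3]
  · by_cases hnil : l.dropWhile (· = '0') = []
    · left
      have := congrArg List.length hsplit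
      rw [hnil] at this
      simp [hlen_l] at this
      omega
    · right
      have hg := getD_drop s (i + t.length) 0
      rw [Nat.add_zero] at hg
      rw [← hg, hdrop_ir]
      have hnot := List.head_dropWhile_not (fun x => decide (x = '0')) (l := l) hnil
      obtain ⟨c, rest, hcr⟩ := List.exists_cons_of_ne_nil hnil
      simp only [hcr, List.head_cons] at hnot
      rw [hcr]
      simp only [List.getD_cons_zero]
      simpa using hnot
  · conv_lhs => rw [hsplit]
    rw [hdrop_ir, ← hrep]

-- main lemma: the two loops agree, relating A's index to B's suffix with counter 0
lemma loops_eq (s : List Char) :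
    ∀ (fuel : Nat), ∀ (i : Nat) (last : String) (code : List String), s.length - i ≤ fuel →
      b8zsLoop s i last code = b8zsAltLoop (s.drop i) 0 last code := by
  intro fuel
  induction fuel with
  | zero =>
    intro i last code h
    have hle : s.length ≤ i := by omega
    rw [b8zsLoop.eq_def]
    rw [dif_neg (by omega), List.drop_eq_nil_of_le hle]
    simp [b8zsAltLoop]
  | succ fuel ih =>
    intro i last code h
    by_cases hi : i < s.length
    · have hdrop : s.drop i = s[i] :: s.drop (i + 1) := List.drop_eq_getElem_cons hi
      have hgetD : s.getD i ' ' = s[i] := List.getD_eq_getElem s ' ' hi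
      by_cases h1 : s[i] = '1'
      · unfold b8zsLoop
        rw [dif_pos hi, if_pos (hgetD ▸ h1), hdrop]
        rw [show b8zsAltLoop (s[i] :: s.drop (i + 1)) 0 last code
            = b8zsAltLoop (s.drop (i + 1)) 0 (invertir last) (code ++ [invertir last]) by
          simp [b8zsAltLoop, h1]]
        exact ih (i + 1) (invertir last) (code ++ [invertir last]) (by omega)
      · by_cases h0 : s[i] = '0'
        · obtain ⟨r, hr1, hrle, hrz, hrend, hrsplit⟩ :=
            drop_run s i hi (hgetD ▸ h0)
          by_cases h8 : 8 ≤ r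
          · -- substitution: A jumps by 8, B's counter reaches 8
            have h7 : i + 7 < s.length := by omega
            have hwin : b8zsWin s i 0 = true := by
              rw [win_iff s i 8 0 (by omega)]
              intro m _ hm8
              exact hrz m (by omega)
            have hsplit8 : s.drop i = List.replicate 8 '0' ++ s.drop (i + 8) := by
              have e : s.drop (i + 8) = (s.drop i).drop 8 := by rw [List.drop_drop]
              rw [e, hrsplit, show r = 8 + (r - 8) by omega, List.replicate_add,
                List.append_assoc]
              congr 1
            rw [b8zsLoop.eq_def]
            rw [dif_pos hi, if_neg (by rw [hgetD]; exact h0 ▸ by decide), if_pos (hgetD ▸ h0),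
              if_pos h7, if_pos hwin]
            rw [ih (i + 8) last _ (by omega)]
            have e := altLoop_zeros last 8 (s.drop (i + 8)) 0 code (by omega)
            rw [← hsplit8] at e
            rw [e]
            norm_num [repSub, subBlock]
          · -- short run: A appends r '0's one by one, B counts them and flushes
            have hArun := aLoop_run s last r i code (by omega) hrz hrend hrle
            rw [hArun, ih (i + r) last (code ++ List.replicate r "0") (by omega)]
            conv_rhs => rw [hrsplit, altLoop_zeros last r (s.drop (i + r)) 0 code (by omega)]
            rw [Nat.zero_add, Nat.mod_eq_of_lt (by omega), Nat.div_eq_of_lt (by omega)]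
            rw [show repSub 0 last = [] from rfl, List.append_nil]
            rw [altLoop_flush (s.drop (i + r)) r last code ?hhead]
            case hhead =>
              rcases hrend with he | he
              · rw [List.drop_eq_nil_of_le (by omega)]; simp
              · by_cases hlt : i + r < s.length
                · rw [List.drop_eq_getElem_cons hlt, List.head?_cons]
                  rw [List.getD_eq_getElem s ' ' hlt] at he
                  simpa using he
                · rw [List.drop_eq_nil_of_le (by omega)]; simp
        · -- junk character: A appends nothing, B flushes an empty counter
          rw [b8zsLoop.eq_def]
          rw [dif_pos hi, if_neg (hgetD ▸ h1), if_neg (hgetD ▸ h0), hdrop]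
          rw [show b8zsAltLoop (s[i] :: s.drop (i + 1)) 0 last code
              = b8zsAltLoop (s.drop (i + 1)) 0 last code by
            simp [b8zsAltLoop, h1, h0]]
          exact ih (i + 1) last code (by omega)
    · unfold b8zsLoop
      rw [dif_neg hi, List.drop_eq_nil_of_le (by omega)]
      simp [b8zsAltLoop]

-- ===== VERDICT (by name: the statement is the Claim_ definition above) =====
theorem b8zs_spec : Claim_equal_b8zs := by
  intro sec last_sign _ _
  unfold Spec_b8zs b8zs b8zs_alt
  rw [loops_eq sec.toList sec.toList.length 0 last_sign [] (by omega)]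
  rfl
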